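-- pv_equiv track=rewrite | github.com/misha21k/Summerfild-exercise | xdump.py | seq_of_bytes
-- ===== SOURCE A (Python) =====
-- def seq_of_bytes(bytes, decimal):
--     """Transforms sequence of bytes in sequence hexadecimal digits"""
--     if decimal:
--         ft = '{0:0>3}'
--     else:
--         ft = '{0:0>2x}'
--     line = ''
--     i = 0
--     for byte in bytes:
--         if i == 4:
--             line += ' '
--             i = 0
--         line += ft.format(byte)
--         i += 1
--     return line
-- ===== SOURCE B (Python) =====
-- def seq_of_bytes(bytes, decimal):
--     """Transforms sequence of bytes in sequence hexadecimal digits"""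
--     ft = '{0:0>3}' if decimal else '{0:0>2x}'
--     toks = [ft.format(byte) for byte in bytes]
--     return ' '.join(''.join(toks[i:i + 4]) for i in range(0, len(toks), 4))
-- ===== Notes on version B (the rewrite author's own statement) =====
-- stated objective: simpler
-- what changed: A's running 4-counter with inline space insertion is replaced by building all formatted tokens once, then chunking them in groups of 4 and joining the chunks with spaces.
import Mathlib
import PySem

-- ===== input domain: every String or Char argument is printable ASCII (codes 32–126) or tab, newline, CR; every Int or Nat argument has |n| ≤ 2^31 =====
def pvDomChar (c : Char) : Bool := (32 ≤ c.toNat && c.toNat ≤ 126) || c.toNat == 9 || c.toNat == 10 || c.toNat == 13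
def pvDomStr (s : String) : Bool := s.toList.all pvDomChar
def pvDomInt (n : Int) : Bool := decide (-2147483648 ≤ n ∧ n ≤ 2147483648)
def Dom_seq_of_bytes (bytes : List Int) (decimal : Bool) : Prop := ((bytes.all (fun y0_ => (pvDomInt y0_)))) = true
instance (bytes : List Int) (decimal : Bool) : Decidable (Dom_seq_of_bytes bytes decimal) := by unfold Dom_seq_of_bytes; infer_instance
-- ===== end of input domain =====

-- B replaces A's running 4-counter and inline space insertion by a token list built once
-- and a chunk-of-4-and-join second pass (objective: simpler decomposition, same cost).

-- shared formatting helpers: Python's '{0:0>3}'.format(b) / '{0:0>2x}'.format(b),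
-- i.e. str(b) / format(b,'x') right-aligned in '0' fill (zeros go BEFORE a minus sign).
def pvHexDigit (n : Nat) : Char := Char.ofNat (if n < 10 then 48 + n else 87 + n)

-- hex digits of n, most significant first ([] for 0); exact for format(n,'x') on naturals > 0
def pvHexAux (n : Nat) : List Char :=
  if h : n = 0 then []
  else pvHexAux (n / 16) ++ [pvHexDigit (n % 16)]
decreasing_by exact Nat.div_lt_self (Nat.pos_of_ne_zero h) (by norm_num)

-- format(n, 'x'): lowercase hex, '-' in front for negatives — exact
def pvHexChars (n : Int) : List Char :=
  if n < 0 then '-' :: pvHexAux (-n).toNat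
  else if n = 0 then ['0'] else pvHexAux n.toNat

-- the '0>w' fill-align: left-pad the whole rendered string (sign included) with '0' — exact
def pvPad0 (cs : List Char) (w : Nat) : List Char := List.replicate (w - cs.length) '0' ++ cs

-- ft.format(byte) for ft = '{0:0>3}' (decimal) / '{0:0>2x}' (hex)
def pvTok (decimal : Bool) (b : Int) : List Char :=
  if decimal then pvPad0 (PySem.Int.toChars b) 3 else pvPad0 (pvHexChars b) 2

-- ===== PORT A =====
-- A's loop: line/i accumulator, space inserted when the counter hits 4
def seqALoop (decimal : Bool) : List Int → List Char → Int → List Char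
  | [], line, _ => line
  | b :: bs, line, i =>
    let p := if i == 4 then (line ++ [' '], (0 : Int)) else (line, i)
    seqALoop decimal bs (p.1 ++ pvTok decimal b) (p.2 + 1)

def seq_of_bytes (bytes : List Int) (decimal : Bool) : String :=
  String.mk (seqALoop decimal bytes [] 0)

-- ===== PORT B =====
-- toks[i:i+4] groups, each ''.join-ed (flatten), for i in range(0, len, 4)
def chunk4 : List (List Char) → List (List Char)
  | [] => []
  | t :: ts => (t :: ts.take 3).flatten :: chunk4 (ts.drop 3)
termination_by ts => ts.length
decreasing_by simp

def seq_of_bytes_alt (bytes : List Int) (decimal : Bool) : String :=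
  String.mk (PySem.Chars.join [' '] (chunk4 (bytes.map (pvTok decimal))))

-- ===== PRECONDITION & SPEC =====
def Spec_seq_of_bytes (bytes : List Int) (decimal : Bool) (out : String) : Prop := out = seq_of_bytes_alt bytes decimal
instance (bytes : List Int) (decimal : Bool) (out : String) : Decidable (Spec_seq_of_bytes bytes decimal out) := by unfold Spec_seq_of_bytes; infer_instance

-- ===== CLAIM (what is proved, stated in full; the proofs are below) =====
def Claim_equal_seq_of_bytes : Prop := ∀ (bytes : List Int) (decimal : Bool), Dom_seq_of_bytes bytes decimal → Spec_seq_of_bytes bytes decimal (seq_of_bytes bytes decimal)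

-- ===== LEMMAS AND PROOFS =====

-- proof-side characterisation of the tail A still has to produce: k slots left in the current group
def pvS : Nat → List (List Char) → List Char
  | _, [] => []
  | 0, t :: ts => ' ' :: (t ++ pvS 3 ts)
  | Nat.succ k, t :: ts => t ++ pvS k ts

theorem pvS_nil (k : Nat) : pvS k [] = [] := by cases k <;> rfl

theorem pvS_take (k : Nat) (ts : List (List Char)) :
    pvS k ts = (ts.take k).flatten ++ pvS 0 (ts.drop k) := by
  induction k generalizing ts with
  | zero => simp
  | succ k ih => cases ts with
    | nil => simp [pvS]
    | cons t ts => simp [pvS, ih ts]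

theorem pvS_zero (ts : List (List Char)) (h : ts ≠ []) : pvS 0 ts = ' ' :: pvS 4 ts := by
  cases ts with
  | nil => exact absurd rfl h
  | cons t ts => simp [pvS]

theorem pvS4_chunk (ts : List (List Char)) :
    pvS 4 ts = PySem.Chars.join [' '] (chunk4 ts) := by
  induction ts using chunk4.induct with
  | case1 => simp [pvS_nil, chunk4, PySem.Chars.join, List.intercalate]
  | case2 t ts ih =>
    show t ++ pvS 3 ts = _
    rw [pvS_take 3 ts, chunk4]
    rcases h : ts.drop 3 with _ | ⟨r, rs⟩ <;> rw [h] at ih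
    · simp [pvS_nil, chunk4, PySem.Chars.join, List.intercalate]
    · rw [pvS_zero _ (by simp), ih, chunk4]
      simp [PySem.Chars.join, List.intercalate, List.intersperse]

theorem seqALoop_eq (decimal : Bool) (bs : List Int) :
    ∀ (line : List Char) (k : Nat), k ≤ 4 →
      seqALoop decimal bs line (4 - (k : Int)) = line ++ pvS k (bs.map (pvTok decimal)) := by
  induction bs with
  | nil => intro line k _; simp [seqALoop, pvS_nil]
  | cons b bs ih =>
    intro line k hk
    cases k with
    | zero =>
      have h4 : ((4 : Int) - (0 : Nat) == 4) = true := by decide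
      show seqALoop decimal (b :: bs) line _ = _
      rw [seqALoop]
      simp only [Nat.cast_zero]
      have := ih (line ++ [' '] ++ pvTok decimal b) 3 (by omega)
      norm_num at this ⊢
      rw [this]
      simp [pvS]
    | succ j =>
      have hne : ((4 : Int) - ((j + 1 : Nat) : Int) == 4) = false := by
        simp; omega
      rw [seqALoop]
      simp only [hne, Bool.false_eq_true, if_false]
      have harith : (4 : Int) - ((j + 1 : Nat) : Int) + 1 = 4 - (j : Nat) := by push_cast; ring
      rw [harith, ih (line ++ pvTok decimal b) j (by omega)]
      simp [pvS, List.map]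

-- ===== VERDICT (by name: the statement is the Claim_ definition above) =====
theorem seq_of_bytes_spec : Claim_equal_seq_of_bytes := by
  intro bytes decimal _
  show seq_of_bytes bytes decimal = seq_of_bytes_alt bytes decimal
  unfold seq_of_bytes seq_of_bytes_alt
  have := seqALoop_eq decimal bytes [] 4 (le_refl _)
  norm_num at this
  rw [this, pvS4_chunk]
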